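-- pv_equiv track=rewrite | github.com/fkotwicki/advent-of-code | 2023/03/solution.py | get_indexed_numbers
-- ===== SOURCE A (Python) =====
-- def get_indexed_numbers(row):
--     numbers = []
--     current_number = ''
--     index = 0
--     for char in row:
--         if char.isdigit():
--             current_number += char
--         elif current_number:
--             numbers.append((index - len(current_number), current_number))
--             current_number = ''
--         index += 1
--     if current_number:
--         numbers.append((index - len(current_number), current_number))
--     return numbers
-- ===== SOURCE B (Python) =====
-- def get_indexed_numbers(row):
--     # Index-jumping scan: find each digit run by index, slice it out, jump past it.
--     numbers = []
--     n = len(row)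
--     i = 0
--     while i < n:
--         if row[i].isdigit():
--             j = i + 1
--             while j < n and row[j].isdigit():
--                 j += 1
--             numbers.append((i, row[i:j]))
--             i = j
--         else:
--             i += 1
--     return numbers
-- ===== Notes on version B (the rewrite author's own statement) =====
-- stated objective: alternative
-- what changed: Replaces A's per-character accumulator/flush state machine with an index-jumping scan that locates each digit run, slices it out of the string in one step and jumps past it.
import Mathlib
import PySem

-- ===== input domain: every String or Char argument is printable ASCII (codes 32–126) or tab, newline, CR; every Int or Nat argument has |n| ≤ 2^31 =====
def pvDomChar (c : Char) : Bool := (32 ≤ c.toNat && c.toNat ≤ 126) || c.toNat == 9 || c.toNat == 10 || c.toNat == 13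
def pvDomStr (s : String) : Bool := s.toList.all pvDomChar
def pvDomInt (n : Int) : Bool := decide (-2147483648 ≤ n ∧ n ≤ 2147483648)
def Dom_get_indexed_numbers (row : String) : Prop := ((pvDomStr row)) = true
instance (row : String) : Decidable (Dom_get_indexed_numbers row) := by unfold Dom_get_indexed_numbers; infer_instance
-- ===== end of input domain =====

-- B replaces A's per-character accumulator/flush state machine with an index-jumping
-- scan that slices out each digit run at once (objective: alternative; return values equal).

-- ===== PORT A =====
-- state: (numbers, current_number, index)
def pvStepA (st : List (Int × String) × List Char × Int) (c : Char) :
    List (Int × String) × List Char × Int :=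
  let (numbers, cur, index) := st
  if PySem.Chars.isdigit c then (numbers, cur ++ [c], index + 1)
  else if cur ≠ [] then (numbers ++ [(index - cur.length, String.mk cur)], [], index + 1)
  else (numbers, cur, index + 1)

def get_indexed_numbers (row : String) : List (Int × String) :=
  let st := row.toList.foldl pvStepA ([], [], 0)
  if st.2.1 ≠ [] then st.1 ++ [(st.2.2 - st.2.1.length, String.mk st.2.1)] else st.1

-- ===== PORT B =====
-- Source B's inner `while j < n and row[j].isdigit(): j += 1` scan = takeWhile/dropWhile
-- over the remaining characters; the outer while loop = structural recursion.
def pvScanB (cs : List Char) (i : Int) : List (Int × String) :=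
  match cs with
  | [] => []
  | c :: rest =>
    if PySem.Chars.isdigit c then
      let run := c :: rest.takeWhile PySem.Chars.isdigit
      (i, String.mk run) :: pvScanB (rest.dropWhile PySem.Chars.isdigit) (i + run.length)
    else pvScanB rest (i + 1)
termination_by cs.length
decreasing_by
  · exact Nat.lt_succ_of_le (List.length_dropWhile_le _ _)
  · simp

def get_indexed_numbers_alt (row : String) : List (Int × String) :=
  pvScanB row.toList 0

-- ===== PRECONDITION & SPEC =====
def Spec_get_indexed_numbers (row : String) (out : List (Int × String)) : Prop := out = get_indexed_numbers_alt row
instance (row : String) (out : List (Int × String)) : Decidable (Spec_get_indexed_numbers row out) := by unfold Spec_get_indexed_numbers; infer_instance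

-- ===== CLAIM (what is proved, stated in full; the proofs are below) =====
def Claim_equal_get_indexed_numbers : Prop := ∀ (row : String), Dom_get_indexed_numbers row → Spec_get_indexed_numbers row (get_indexed_numbers row)

-- ===== LEMMAS AND PROOFS =====

-- A's final flush applied to a state
def pvFinishA (st : List (Int × String) × List Char × Int) : List (Int × String) :=
  if st.2.1 ≠ [] then st.1 ++ [(st.2.2 - st.2.1.length, String.mk st.2.1)] else st.1

-- What A's loop denotes from an arbitrary state, phrased via B's scan
def pvRest (cs : List Char) (cur : List Char) (index : Int) : List (Int × String) :=
  match cur with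
  | [] => pvScanB cs index
  | _ :: _ =>
    (index - cur.length, String.mk (cur ++ cs.takeWhile PySem.Chars.isdigit)) ::
      pvScanB (cs.dropWhile PySem.Chars.isdigit) (index + (cs.takeWhile PySem.Chars.isdigit).length)

theorem pvLoopA_eq (cs : List Char) : ∀ (numbers : List (Int × String)) (cur : List Char) (index : Int),
    pvFinishA (cs.foldl pvStepA (numbers, cur, index)) = numbers ++ pvRest cs cur index := by
  induction cs with
  | nil =>
    intro numbers cur index
    cases cur with
    | nil => simp [pvFinishA, pvRest, pvScanB]
    | cons a l => simp [pvFinishA, pvRest, pvScanB]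
  | cons c rest ih =>
    intro numbers cur index
    by_cases hd : PySem.Chars.isdigit c
    · cases cur with
      | nil =>
        simp only [List.foldl_cons, pvStepA, hd, if_true, List.nil_append, ih, pvRest, pvScanB]
        simp only [hd, if_true, List.takeWhile_cons, List.dropWhile_cons, List.length_cons]
        congr 3 <;> first
          | (push_cast; omega)
          | simp
      | cons a l =>
        simp only [List.foldl_cons, pvStepA, hd, if_true, ih, pvRest]
        simp only [hd, if_true, List.takeWhile_cons, List.dropWhile_cons, List.length_cons,
          List.length_append, List.append_assoc, List.cons_append, List.nil_append]
        congr 3 <;> first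
          | (push_cast; omega)
          | simp
    · cases cur with
      | nil =>
        simp only [List.foldl_cons, pvStepA, hd, if_false]
        simp only [ne_eq, not_true_eq_false, if_false, reduceIte, ih]
        simp [pvRest, pvScanB, hd]
      | cons a l =>
        simp only [List.foldl_cons, pvStepA, hd]
        simp only [Bool.false_eq_true, if_false, ne_eq, reduceCtorEq, not_false_eq_true, if_true, ih]
        simp [pvRest, pvScanB, hd, List.append_assoc]

-- ===== VERDICT (by name: the statement is the Claim_ definition above) =====
theorem get_indexed_numbers_spec : Claim_equal_get_indexed_numbers := by
  intro row _
  show get_indexed_numbers row = get_indexed_numbers_alt row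
  have h := pvLoopA_eq row.toList [] [] 0
  simpa [get_indexed_numbers, pvFinishA, pvRest, get_indexed_numbers_alt] using h
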